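-- pv_equiv track=rewrite | github.com/NVIDIA/NVFlare | nvflare/apis/impl/job_dispatcher.py | get_site_to_app_map
-- ===== SOURCE A (Python) =====
-- from typing import Dict, List
--
-- def get_site_to_app_map(deployment: Dict[str, List[str]]):
--     result = {}
--     for app_name, site_names in deployment.items():
--         for site_name in site_names:
--             if site_name in result:
--                 raise RuntimeError("Each site can only run one app in a job.")
--             else:
--                 result[site_name] = app_name
--     return result
-- ===== SOURCE B (Python) =====
-- def get_site_to_app_map(deployment):
--     pairs = [(site, app) for app, sites in deployment.items() for site in sites]
--     ordered = sorted(site for site, _ in pairs)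
--     for x, y in zip(ordered, ordered[1:]):
--         if x == y:
--             raise RuntimeError("Each site can only run one app in a job.")
--     return dict(pairs)
-- ===== Notes on version B (the rewrite author's own statement) =====
-- stated objective: alternative
-- what changed: Flattens the deployment into (site, app) pairs, detects duplicate sites by sorting the site list and scanning adjacent elements (comparison-based, no hash membership test inside the build loop), and only then constructs the dict in one shot with dict(pairs).
import Mathlib
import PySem

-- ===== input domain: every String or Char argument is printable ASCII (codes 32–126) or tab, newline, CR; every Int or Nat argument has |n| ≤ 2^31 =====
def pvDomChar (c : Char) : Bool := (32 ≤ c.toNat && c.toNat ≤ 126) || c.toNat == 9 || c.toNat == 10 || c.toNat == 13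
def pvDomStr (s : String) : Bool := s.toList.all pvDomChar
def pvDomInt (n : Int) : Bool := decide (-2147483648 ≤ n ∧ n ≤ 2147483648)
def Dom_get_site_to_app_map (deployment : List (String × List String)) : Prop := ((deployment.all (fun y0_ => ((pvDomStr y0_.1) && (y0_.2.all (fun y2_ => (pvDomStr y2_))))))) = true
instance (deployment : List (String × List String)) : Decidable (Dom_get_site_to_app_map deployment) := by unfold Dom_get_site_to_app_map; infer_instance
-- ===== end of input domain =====

-- B flattens to (site, app) pairs, detects duplicate sites by sorting the site list and
-- scanning adjacent elements, then builds the dict from the pair list; objective: alternative.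

-- ===== PORT A =====
-- inner 'for site_name in site_names' loop; none = the RuntimeError raise
def pvInnerA (app : String) : List String → PySem.Dict String String → Option (PySem.Dict String String)
  | [], d => some d
  | s :: rest, d => if d.contains s then none else pvInnerA app rest (d.insert s app)

-- outer 'for app_name, site_names in deployment.items()' loop
def pvOuterA : List (String × List String) → PySem.Dict String String → Option (PySem.Dict String String)
  | [], d => some d
  | (app, sites) :: rest, d =>
    match pvInnerA app sites d with
    | none => none
    | some d' => pvOuterA rest d'

-- the raise path (none) is excluded by Pre_; '.getD empty' only discharges the Option there
def get_site_to_app_map (deployment : List (String × List String)) : List (String × String) :=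
  ((pvOuterA deployment PySem.Dict.empty).getD PySem.Dict.empty).items

-- ===== PORT B =====
-- the 'for x, y in zip(ordered, ordered[1:])' scan: true iff some adjacent pair is equal
def pvAdjDup : List String → Bool
  | [] => false
  | [_] => false
  | x :: y :: rest => x == y || pvAdjDup (y :: rest)

def get_site_to_app_map_alt (deployment : List (String × List String)) : List (String × String) :=
  let pairs := deployment.flatMap (fun p => p.2.map (fun s => (s, p.1)))
  let ordered := PySem.List.sorted (pairs.map Prod.fst) (fun x => x) false
  -- the raise branch (an adjacent duplicate) is excluded by Pre_; [] only discharges it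
  if pvAdjDup ordered then []
  else (PySem.Dict.ofList pairs).items

-- ===== PRECONDITION & SPEC =====
-- Pre_ excludes deployments with a repeated site name, on which A (and B) raise RuntimeError.
def Pre_get_site_to_app_map (deployment : List (String × List String)) : Prop :=
  (deployment.flatMap (·.2)).Nodup
instance (deployment : List (String × List String)) : Decidable (Pre_get_site_to_app_map deployment) := by
  unfold Pre_get_site_to_app_map; infer_instance

def pvWitness_get_site_to_app_map : (List (String × List String)) :=
  [("app1", ["siteA", "siteB"]), ("app2", ["siteC"])]

def Spec_get_site_to_app_map (deployment : List (String × List String)) (out : List (String × String)) : Prop := out = get_site_to_app_map_alt deployment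
instance (deployment : List (String × List String)) (out : List (String × String)) : Decidable (Spec_get_site_to_app_map deployment out) := by unfold Spec_get_site_to_app_map; infer_instance

-- ===== CLAIM (what is proved, stated in full; the proofs are below) =====
def Claim_equal_get_site_to_app_map : Prop := ∀ (deployment : List (String × List String)), Dom_get_site_to_app_map deployment → Pre_get_site_to_app_map deployment → Spec_get_site_to_app_map deployment (get_site_to_app_map deployment)

-- ===== LEMMAS AND PROOFS =====

-- a duplicate-free list has no equal adjacent elements
theorem pvAdjDup_eq_false_of_nodup (l : List String) (h : l.Nodup) : pvAdjDup l = false := by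
  match l with
  | [] => rfl
  | [_] => rfl
  | x :: y :: rest =>
    have h' := List.nodup_cons.mp h
    have hne : (x == y) = false := by
      simp only [beq_eq_false_iff_ne, ne_eq]
      rintro rfl; exact h'.1 (by simp)
    simp [pvAdjDup, hne, pvAdjDup_eq_false_of_nodup (y :: rest) h'.2]

-- A's inner loop never raises when the sites are fresh and duplicate-free; it equals the flat insert fold.
theorem pvInnerA_eq (app : String) (sites : List String) (d : PySem.Dict String String)
    (hfresh : ∀ s ∈ sites, d.contains s = false) (hnd : sites.Nodup) :
    pvInnerA app sites d = some (sites.foldl (fun d s => d.insert s app) d) := by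
  induction sites generalizing d with
  | nil => rfl
  | cons s rest ih =>
    simp only [pvInnerA, hfresh s (by simp), Bool.false_eq_true, if_false, List.foldl_cons]
    apply ih
    · intro s' hs'
      rw [PySem.Dict.contains_insert]
      have : s' ≠ s := by
        rintro rfl; exact (List.nodup_cons.mp hnd).1 hs'
      simp [this, hfresh s' (by simp [hs'])]
    · exact (List.nodup_cons.mp hnd).2

theorem pvOuterA_eq (deps : List (String × List String)) (d : PySem.Dict String String)
    (hfresh : ∀ s ∈ deps.flatMap (·.2), d.contains s = false)
    (hnd : (deps.flatMap (·.2)).Nodup) :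
    pvOuterA deps d =
      some (deps.foldl (fun d p => p.2.foldl (fun d s => d.insert s p.1) d) d) := by
  induction deps generalizing d with
  | nil => rfl
  | cons p rest ih =>
    obtain ⟨app, sites⟩ := p
    simp only [List.flatMap_cons, List.nodup_append] at hnd hfresh
    rw [pvOuterA, pvInnerA_eq app sites d (fun s hs => hfresh s (by simp [hs])) hnd.1]
    apply ih
    · intro s hs
      have hkeys : (sites.foldl (fun d s => d.insert s app) d).keys = PySem.Set.update d.keys sites :=
        PySem.Dict.keys_foldl_insert sites _ d
      rw [PySem.Dict.contains_eq_decide_mem_keys, hkeys, decide_eq_false_iff_not,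
        PySem.Set.mem_update]
      push Not
      constructor
      · intro hmem
        have := hfresh s (by simp [hs])
        rw [PySem.Dict.contains_eq_decide_mem_keys, decide_eq_false_iff_not] at this
        exact this hmem
      · intro hmem
        exact hnd.2.2 s hmem s hs rfl
    · exact hnd.2.1

-- the nested insert fold is the flat fold over the (site, app) pairs
theorem foldl_nested_eq_flat (deps : List (String × List String)) (d : PySem.Dict String String) :
    deps.foldl (fun d p => p.2.foldl (fun d s => d.insert s p.1) d) d =
      (deps.flatMap (fun p => p.2.map (fun s => (s, p.1)))).foldl (fun d q => d.insert q.1 q.2) d := by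
  induction deps generalizing d with
  | nil => rfl
  | cons p rest ih =>
    simp only [List.foldl_cons, List.flatMap_cons, List.foldl_append, ih, List.foldl_map]

-- ===== VERDICT (by name: the statement is the Claim_ definition above) =====
theorem get_site_to_app_map_spec : Claim_equal_get_site_to_app_map := by
  intro deployment _ hpre
  unfold Pre_get_site_to_app_map at hpre
  unfold Spec_get_site_to_app_map get_site_to_app_map get_site_to_app_map_alt
  rw [pvOuterA_eq deployment PySem.Dict.empty (by simp) hpre, Option.getD_some]
  have hfst : (deployment.flatMap (fun p => p.2.map (fun s => (s, p.1)))).map Prod.fst =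
      deployment.flatMap (·.2) := by
    simp [List.map_flatMap, List.map_map, Function.comp_def]
  have hdup : pvAdjDup (PySem.List.sorted
      ((deployment.flatMap (fun p => p.2.map (fun s => (s, p.1)))).map Prod.fst)
      (fun x => x) false) = false := by
    apply pvAdjDup_eq_false_of_nodup
    exact ((PySem.List.sorted_perm _ _ _).nodup_iff).mpr (hfst ▸ hpre)
  simp only [hdup, Bool.false_eq_true, if_false]
  rw [foldl_nested_eq_flat]
  rfl
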